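-- pv_equiv track=rewrite | github.com/ephemient/aoc2021 | py/aoc2021/day9.py | part2
-- ===== SOURCE A (Python) =====
-- from math import prod
--
-- def part2(lines):
--     """
--     >>> part2(["2199943210", "3987894921", "9856789892", "8767896789", "9899965678"])
--     1134
--     """
--     basins = []
--     visited = [[False for _ in line.strip()] for line in lines]
--     for i, line in enumerate(lines):
--         for j, c in enumerate(line.strip()):
--             if visited[i][j] or not ("0" <= c < "9"):
--                 continue
--             basin = {(i, j)}
--             stack = [(i, j)]
--             while stack:
--                 i2, j2 = stack.pop()
--                 visited[i2][j2] = True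
--                 for i3, j3 in ((i2 - 1, j2), (i2, j2 - 1), (i2, j2 + 1), (i2 + 1, j2)):
--                     if (
--                         0 <= i3 < len(lines)
--                         and 0 <= j3 < len(lines[i3].strip())
--                         and "0" <= lines[i3][j3] < "9"
--                         and (i3, j3) not in basin
--                     ):
--                         basin.add((i3, j3))
--                         stack.append((i3, j3))
--             basins.append(len(basin))
--     return prod(sorted(basins)[-3:])
-- ===== SOURCE B (Python) =====
-- from math import prod
--
-- def part2(lines):
--     stripped = [line.strip() for line in lines]
--     h = len(lines)
--
--     def ok(a, b):
--         return 0 <= a < h and 0 <= b < len(stripped[a]) and "0" <= lines[a][b] < "9"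
--
--     seen = set()
--     sizes = []
--     for i in range(h):
--         for j in range(len(stripped[i])):
--             if (i, j) in seen or not ("0" <= stripped[i][j] < "9"):
--                 continue
--             comp = {(i, j)}
--             frontier = [(i, j)]
--             while frontier:
--                 nxt = []
--                 for x, y in frontier:
--                     for a, b in ((x - 1, y), (x, y - 1), (x, y + 1), (x + 1, y)):
--                         if ok(a, b) and (a, b) not in comp:
--                             comp.add((a, b))
--                             nxt.append((a, b))
--                 frontier = nxt
--             seen |= comp
--             sizes.append(len(comp))
--     return prod(sorted(sizes)[-3:])
-- ===== Notes on version B (the rewrite author's own statement) =====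
-- stated objective: alternative
-- what changed: Per-seed DFS with an explicit pop-from-end stack, a basin set and a 2D visited boolean grid marked on pop is replaced by frontier-layer (BFS-style) flood fill over a once-precomputed stripped-lines table, a flat seen-set of cells updated per component, and discovery-time marking; the discovered sets coincide because traversal order does not affect the closure.
import Mathlib
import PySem

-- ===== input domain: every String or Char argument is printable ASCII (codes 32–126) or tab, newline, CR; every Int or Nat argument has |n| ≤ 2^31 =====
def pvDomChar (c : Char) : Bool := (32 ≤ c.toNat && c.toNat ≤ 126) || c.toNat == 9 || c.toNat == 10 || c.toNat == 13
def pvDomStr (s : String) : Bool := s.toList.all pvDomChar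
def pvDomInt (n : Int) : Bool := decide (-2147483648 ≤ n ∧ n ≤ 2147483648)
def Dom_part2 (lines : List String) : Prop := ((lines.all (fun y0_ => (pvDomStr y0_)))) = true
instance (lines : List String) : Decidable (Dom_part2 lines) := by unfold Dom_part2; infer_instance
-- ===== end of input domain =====

-- B replaces A's per-cell DFS (explicit stack, pop-from-end, visited marked on pop) by a frontier-layer
-- flood fill over a precomputed stripped-lines table with a seen-set updated per component; the discovered
-- sets coincide because traversal order does not affect the closure (objective: alternative).


-- ===== PORT A =====
-- A's neighbour admission test: 0 <= i3 < len(lines) and 0 <= j3 < len(lines[i3].strip()) and "0" <= lines[i3][j3] < "9"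
def condA (lines : List String) (c : Int × Int) : Bool :=
  decide (0 ≤ c.1) && decide (c.1 < (lines.length : Int)) &&
  decide (0 ≤ c.2) && decide (c.2 < ((PySem.Str.strip (PySem.List.pyGetD lines c.1 "")).toList.length : Int)) &&
  decide ('0' ≤ PySem.List.pyGetD (PySem.List.pyGetD lines c.1 "").toList c.2 ' ') &&
  decide (PySem.List.pyGetD (PySem.List.pyGetD lines c.1 "").toList c.2 ' ' < '9')

-- the neighbour tuple ((i2-1,j2),(i2,j2-1),(i2,j2+1),(i2+1,j2))
def nbrsA (i2 j2 : Int) : List (Int × Int) := [(i2 - 1, j2), (i2, j2 - 1), (i2, j2 + 1), (i2 + 1, j2)]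

-- the body of A's `for i3, j3 in ...` neighbour loop
def pushStepA (lines : List String) (st : PySem.Set (Int × Int) × List (Int × Int)) (n : Int × Int) :
    PySem.Set (Int × Int) × List (Int × Int) :=
  if condA lines n && !(PySem.Set.contains st.1 n) then (PySem.Set.add st.1 n, st.2 ++ [n]) else st

-- A's `while stack:` loop; fuel only guards termination (proved sufficient below)
def loopA (lines : List String) : Nat → PySem.Set (Int × Int) → List (Int × Int) → List (List Bool) →
    PySem.Set (Int × Int) × List (List Bool)
  | 0, basin, _, visited => (basin, visited)
  | fuel + 1, basin, stack, visited =>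
    match PySem.List.pop? stack (-1) with
    | none => (basin, visited)
    | some (c, rest) =>
      let visited' := PySem.List.pySetD visited c.1
        (PySem.List.pySetD (PySem.List.pyGetD visited c.1 []) c.2 true)
      let st := (nbrsA c.1 c.2).foldl (pushStepA lines) (basin, rest)
      loopA lines fuel st.1 st.2 visited'

def part2 (lines : List String) : Int :=
  let visited0 : List (List Bool) := lines.map (fun line => (PySem.Str.strip line).toList.map (fun _ => false))
  let fuel := (lines.map (fun line => (PySem.Str.strip line).toList.length)).sum + 2
  let res := (PySem.List.enumerate lines 0).foldl
    (fun (st : List Int × List (List Bool)) p =>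
      (PySem.List.enumerate (PySem.Str.strip p.2).toList 0).foldl
        (fun (st : List Int × List (List Bool)) q =>
          if PySem.List.pyGetD (PySem.List.pyGetD st.2 p.1 []) q.1 false
              || !(decide ('0' ≤ q.2) && decide (q.2 < '9')) then st
          else
            let r := loopA lines fuel (PySem.Set.ofList [(p.1, q.1)]) [(p.1, q.1)] st.2
            (st.1 ++ [(r.1.length : Int)], r.2)) st)
    ([], visited0)
  (PySem.List.slice (PySem.List.sorted res.1 (fun x => x) false) (some (-3)) none).foldl (· * ·) 1

-- ===== PORT B =====
-- B's `ok(a, b)` over the precomputed stripped table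
def okB (lines stripped : List String) (c : Int × Int) : Bool :=
  decide (0 ≤ c.1) && decide (c.1 < (lines.length : Int)) &&
  decide (0 ≤ c.2) && decide (c.2 < ((PySem.List.pyGetD stripped c.1 "").toList.length : Int)) &&
  decide ('0' ≤ PySem.List.pyGetD (PySem.List.pyGetD lines c.1 "").toList c.2 ' ') &&
  decide (PySem.List.pyGetD (PySem.List.pyGetD lines c.1 "").toList c.2 ' ' < '9')

def nbrsB (x y : Int) : List (Int × Int) := [(x - 1, y), (x, y - 1), (x, y + 1), (x + 1, y)]

-- the body of B's `for a, b in ...` neighbour loop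
def pushStepB (lines stripped : List String) (st : PySem.Set (Int × Int) × List (Int × Int)) (n : Int × Int) :
    PySem.Set (Int × Int) × List (Int × Int) :=
  if okB lines stripped n && !(PySem.Set.contains st.1 n) then (PySem.Set.add st.1 n, st.2 ++ [n]) else st

-- B's `while frontier:` layer loop; fuel only guards termination (proved sufficient below)
def loopB (lines stripped : List String) : Nat → PySem.Set (Int × Int) → List (Int × Int) →
    PySem.Set (Int × Int)
  | 0, comp, _ => comp
  | fuel + 1, comp, frontier =>
    match frontier with
    | [] => comp
    | _ :: _ =>
      let st := frontier.foldl
        (fun (st : PySem.Set (Int × Int) × List (Int × Int)) xy =>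
          (nbrsB xy.1 xy.2).foldl (pushStepB lines stripped) st)
        (comp, ([] : List (Int × Int)))
      loopB lines stripped fuel st.1 st.2

def part2_alt (lines : List String) : Int :=
  let stripped := lines.map PySem.Str.strip
  let h : Int := lines.length
  let fuel := (stripped.map (fun s => s.toList.length)).sum + 2
  let res := (PySem.List.pyRange 0 h 1).foldl
    (fun (st : PySem.Set (Int × Int) × List Int) i =>
      (PySem.List.pyRange 0 ((PySem.List.pyGetD stripped i "").toList.length : Int) 1).foldl
        (fun (st : PySem.Set (Int × Int) × List Int) j =>
          if PySem.Set.contains st.1 (i, j)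
              || !(decide ('0' ≤ PySem.List.pyGetD (PySem.List.pyGetD stripped i "").toList j ' ')
                    && decide (PySem.List.pyGetD (PySem.List.pyGetD stripped i "").toList j ' ' < '9')) then st
          else
            let comp := loopB lines stripped fuel (PySem.Set.ofList [(i, j)]) [(i, j)]
            (PySem.Set.union st.1 comp, st.2 ++ [(comp.length : Int)])) st)
    (PySem.Set.empty, [])
  (PySem.List.slice (PySem.List.sorted res.2 (fun x => x) false) (some (-3)) none).foldl (· * ·) 1

-- ===== PRECONDITION & SPEC =====
def Spec_part2 (lines : List String) (out : Int) : Prop := out = part2_alt lines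
instance (lines : List String) (out : Int) : Decidable (Spec_part2 lines out) := by unfold Spec_part2; infer_instance

-- ===== CLAIM (what is proved, stated in full; the proofs are below) =====
def Claim_equal_part2 : Prop := ∀ (lines : List String), Dom_part2 lines → Spec_part2 lines (part2 lines)

-- ===== LEMMAS AND PROOFS =====

-- B's admission test over the precomputed stripped table coincides with A's
lemma okB_eq_condA (lines : List String) (c : Int × Int) :
    okB lines (lines.map PySem.Str.strip) c = condA lines c := by
  have h : PySem.List.pyGetD (lines.map PySem.Str.strip) c.1 "" = PySem.Str.strip (PySem.List.pyGetD lines c.1 "") := by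
    have := PySem.List.pyGetD_map PySem.Str.strip lines c.1 ""
    simpa using this
  simp [okB, condA, h]

-- the length (in chars) of the i-th stripped line
def stripLenN (lines : List String) (i : Nat) : Nat := (PySem.Str.strip (lines.getD i "")).toList.length

-- in-bounds cells: the cells A's outer scan enumerates
def InB (lines : List String) (c : Int × Int) : Prop :=
  0 ≤ c.1 ∧ c.1 < (lines.length : Int) ∧ 0 ≤ c.2 ∧ c.2 < (stripLenN lines c.1.toNat : Int)

def allCells (lines : List String) : List (Int × Int) :=
  (List.range lines.length).flatMap
    (fun i => (List.range (stripLenN lines i)).map (fun (j : Nat) => ((i : Int), (j : Int))))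

def Valid (lines : List String) (c : Int × Int) : Prop := condA lines c = true

def ClosedU (lines : List String) (P : Int × Int → Prop) : Prop :=
  ∀ x, P x → ∀ n ∈ nbrsA x.1 x.2, Valid lines n → P n

def visGet (visited : List (List Bool)) (c : Int × Int) : Bool :=
  PySem.List.pyGetD (PySem.List.pyGetD visited c.1 []) c.2 false

def Shape (lines : List String) (visited : List (List Bool)) : Prop :=
  visited.length = lines.length ∧ ∀ i (h : i < visited.length), visited[i].length = stripLenN lines i

lemma mem_allCells (lines : List String) (c : Int × Int) : c ∈ allCells lines ↔ InB lines c := by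
  obtain ⟨a, b⟩ := c
  simp only [allCells, List.mem_flatMap, List.mem_map, List.mem_range, InB, Prod.mk.injEq]
  constructor
  · rintro ⟨i, hi, j, hj, rfl, rfl⟩
    simp only [Int.toNat_natCast]
    refine ⟨Int.natCast_nonneg i, by exact_mod_cast hi, Int.natCast_nonneg j, by exact_mod_cast hj⟩
  · rintro ⟨h1, h2, h3, h4⟩
    refine ⟨a.toNat, by omega, b.toNat, ?_, by omega, by omega⟩
    have ha : ((a.toNat : Int)) = a := by omega
    rw [ha] at *
    omega

lemma valid_InB (lines : List String) (c : Int × Int) (h : Valid lines c) : InB lines c := by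
  simp only [Valid, condA, Bool.and_eq_true, decide_eq_true_eq] at h
  obtain ⟨⟨⟨⟨⟨h1, h2⟩, h3⟩, h4⟩, -⟩, -⟩ := h
  refine ⟨h1, h2, h3, ?_⟩
  rw [PySem.List.pyGetD_eq_getElem lines "" h1 (by simpa using h2)] at h4
  unfold stripLenN
  rw [List.getD_eq_getElem lines "" (by omega)]
  exact h4

lemma length_allCells (lines : List String) :
    (allCells lines).length = (lines.map (fun line => (PySem.Str.strip line).toList.length)).sum := by
  have h : (List.map (fun line => (PySem.Str.strip line).toList.length) lines)
      = List.map (fun i => stripLenN lines i) (List.range lines.length) := by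
    apply List.ext_getElem (by simp)
    intro n h1 h2
    simp only [List.getElem_map, List.getElem_range, stripLenN]
    rw [List.getD_eq_getElem lines "" (by simpa using h1)]
  rw [allCells, List.length_flatMap, h]
  simp only [List.length_map, List.length_range]

-- B's step over the stripped table is A's step
lemma pushStepB_eq (lines : List String) :
    pushStepB lines (lines.map PySem.Str.strip) = pushStepA lines := by
  funext st n
  unfold pushStepA pushStepB
  rw [okB_eq_condA]

lemma pushFold_spec (lines : List String) (L : List (Int × Int)) :
    ∀ (S : PySem.Set (Int × Int)) (W : List (Int × Int)), S.Nodup →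
    ∃ D, (L.foldl (pushStepA lines) (S, W)).1 = S ++ D ∧ (L.foldl (pushStepA lines) (S, W)).2 = W ++ D ∧
      (∀ x ∈ D, x ∈ L ∧ Valid lines x ∧ x ∉ S) ∧ (S ++ D).Nodup ∧
      (∀ n ∈ L, Valid lines n → n ∈ S ++ D) := by
  induction L with
  | nil =>
    intro S W hS
    exact ⟨[], by simp, by simp, by simp, by simpa using hS, by simp⟩
  | cons n L ih =>
    intro S W hS
    by_cases hc : (condA lines n && !(PySem.Set.contains S n)) = true
    · have hparts := hc
      simp only [Bool.and_eq_true, Bool.not_eq_true', PySem.Set.contains_eq_listContains] at hparts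
      have hnm : n ∉ S := by
        intro hmem
        have h2 : List.contains S n = true := by
          have := (PySem.Set.contains_iff S n).2 hmem
          simpa [PySem.Set.contains_eq_listContains] using this
        rw [hparts.2] at h2
        exact Bool.false_ne_true h2
      have hv : Valid lines n := hparts.1
      have hadd : PySem.Set.add S n = S ++ [n] := by
        unfold PySem.Set.add
        rw [if_neg (by simpa [PySem.Set.contains_eq_listContains] using hnm)]
      have hstep : pushStepA lines (S, W) n = (S ++ [n], W ++ [n]) := by
        simp only [pushStepA]
        rw [if_pos hc, hadd]
      have hdisj : S.Disjoint [n] := by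
        intro x hx hxn
        rcases List.mem_singleton.mp hxn with rfl
        exact absurd hx hnm
      have hS' : (S ++ [n]).Nodup := List.Nodup.append hS (List.nodup_singleton _) hdisj
      obtain ⟨D, h1, h2, h3, h4, h5⟩ := ih (S ++ [n]) (W ++ [n]) hS'
      refine ⟨n :: D, ?_, ?_, ?_, ?_, ?_⟩
      · rw [List.foldl_cons, hstep, h1]; simp
      · rw [List.foldl_cons, hstep, h2]; simp
      · intro x hx
        rcases List.mem_cons.mp hx with rfl | hx
        · exact ⟨List.mem_cons_self, hv, hnm⟩
        · obtain ⟨hl, hvv, hns⟩ := h3 x hx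
          exact ⟨List.mem_cons_of_mem _ hl, hvv, fun hmem => hns (by simp [hmem])⟩
      · have he : S ++ n :: D = (S ++ [n]) ++ D := by simp
        rw [he]; exact h4
      · intro m hm hvm
        rcases List.mem_cons.mp hm with rfl | hm
        · simp
        · have := h5 m hm hvm
          simpa using this
    · have hstep : pushStepA lines (S, W) n = (S, W) := by
        simp only [pushStepA]
        rw [if_neg (by simpa using hc)]
      obtain ⟨D, h1, h2, h3, h4, h5⟩ := ih S W hS
      refine ⟨D, ?_, ?_, ?_, h4, ?_⟩
      · rw [List.foldl_cons, hstep]; exact h1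
      · rw [List.foldl_cons, hstep]; exact h2
      · intro x hx
        obtain ⟨hl, hvv, hns⟩ := h3 x hx
        exact ⟨List.mem_cons_of_mem _ hl, hvv, hns⟩
      · intro m hm hvm
        rcases List.mem_cons.mp hm with rfl | hm
        · have hcm : PySem.Set.contains S m = true := by
            by_contra hcc
            apply hc
            simp only [Bool.and_eq_true, Bool.not_eq_true']
            exact ⟨hvm, by simpa using hcc⟩
          have hms : m ∈ S := (PySem.Set.contains_iff S m).1 hcm
          exact List.mem_append.2 (Or.inl hms)
        · exact h5 m hm hvm

lemma mark_spec (lines : List String) (visited : List (List Bool)) (hsh : Shape lines visited)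
    (c0 : Int × Int) (h0 : InB lines c0) :
    Shape lines (PySem.List.pySetD visited c0.1
        (PySem.List.pySetD (PySem.List.pyGetD visited c0.1 []) c0.2 true)) ∧
    ∀ c : Int × Int, 0 ≤ c.1 → 0 ≤ c.2 → visGet (PySem.List.pySetD visited c0.1
        (PySem.List.pySetD (PySem.List.pyGetD visited c0.1 []) c0.2 true)) c
      = if c = c0 then true else visGet visited c := by
  obtain ⟨hsh1, hsh2⟩ := hsh
  obtain ⟨hb1, hb2, hb3, hb4⟩ := h0
  have hi0 : c0.1.toNat < visited.length := by omega
  have hrow : PySem.List.pyGetD visited c0.1 [] = visited[c0.1.toNat] :=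
    PySem.List.pyGetD_eq_getElem visited [] hb1 (by omega)
  have hrowlen : visited[c0.1.toNat].length = stripLenN lines c0.1.toNat := hsh2 _ hi0
  have hj0 : c0.2.toNat < visited[c0.1.toNat].length := by omega
  have hvis' : PySem.List.pySetD visited c0.1
        (PySem.List.pySetD (PySem.List.pyGetD visited c0.1 []) c0.2 true)
      = visited.set c0.1.toNat (visited[c0.1.toNat].set c0.2.toNat true) := by
    rw [hrow, PySem.List.pySetD_of_nonneg _ _ hb3, PySem.List.pySetD_of_nonneg _ _ hb1]
  rw [hvis']
  refine ⟨⟨by simpa using hsh1, ?_⟩, ?_⟩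
  · intro i hi
    simp only [List.getElem_set]
    split_ifs with hieq
    · rw [← hieq]
      simpa [List.length_set] using hrowlen
    · exact hsh2 i (by simpa using hi)
  · intro c hc1 hc2
    by_cases hrange1 : c.1 < (visited.length : Int)
    · have hcn : c.1.toNat < visited.length := by omega
      have hget1 : PySem.List.pyGetD (visited.set c0.1.toNat (visited[c0.1.toNat].set c0.2.toNat true)) c.1 []
          = if c0.1.toNat = c.1.toNat then visited[c0.1.toNat].set c0.2.toNat true else visited[c.1.toNat]'hcn := by
        rw [PySem.List.pyGetD_eq_getElem _ [] hc1 (by simpa [List.length_set] using hrange1)]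
        simp [List.getElem_set]
      have hget1' : PySem.List.pyGetD visited c.1 [] = visited[c.1.toNat]'hcn :=
        PySem.List.pyGetD_eq_getElem _ [] hc1 (by omega)
      by_cases heq1 : c0.1.toNat = c.1.toNat
      · have hceq1 : c.1 = c0.1 := by omega
        by_cases hrange2 : c.2 < (visited[c0.1.toNat].length : Int)
        · have hj : c.2.toNat < visited[c0.1.toNat].length := by omega
          have hA : visGet (visited.set c0.1.toNat (visited[c0.1.toNat].set c0.2.toNat true)) c
              = (if c0.2.toNat = c.2.toNat then true else visited[c0.1.toNat][c.2.toNat]'hj) := by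
            unfold visGet
            rw [hget1, if_pos heq1,
              PySem.List.pyGetD_eq_getElem _ false hc2 (by simpa [List.length_set] using hrange2)]
            simp [List.getElem_set]
          have hB : visGet visited c = visited[c0.1.toNat][c.2.toNat]'hj := by
            unfold visGet
            rw [hceq1, hrow, PySem.List.pyGetD_eq_getElem _ false hc2 (by omega)]
          rw [hA, hB]
          by_cases heq2 : c0.2.toNat = c.2.toNat
          · rw [if_pos heq2, if_pos (Prod.ext hceq1 (by omega))]
          · rw [if_neg heq2, if_neg (by intro hcc; apply heq2; rw [hcc])]
        · have hcne : c ≠ c0 := by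
            intro hcc
            rw [hcc] at hrange2
            exact hrange2 (by omega)
          have hA : visGet (visited.set c0.1.toNat (visited[c0.1.toNat].set c0.2.toNat true)) c = false := by
            unfold visGet
            rw [hget1, if_pos heq1]
            apply PySem.List.pyGetD_of_none
            rw [PySem.List.pyGet?_eq_none_iff]
            simp only [PySem.Raise.InRange, List.length_set]
            omega
          have hB : visGet visited c = false := by
            unfold visGet
            rw [hceq1, hrow]
            apply PySem.List.pyGetD_of_none
            rw [PySem.List.pyGet?_eq_none_iff]
            simp only [PySem.Raise.InRange]
            omega
          rw [hA, hB, if_neg hcne]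
      · have hcne : c ≠ c0 := by
          intro hcc
          apply heq1
          rw [hcc]
        unfold visGet
        rw [hget1, if_neg heq1, if_neg hcne, hget1']
    · have hcne : c ≠ c0 := by
        intro hcc
        rw [hcc] at hrange1
        exact hrange1 (by omega)
      have hnone1 : PySem.List.pyGetD (visited.set c0.1.toNat (visited[c0.1.toNat].set c0.2.toNat true)) c.1 [] = [] := by
        apply PySem.List.pyGetD_of_none
        rw [PySem.List.pyGet?_eq_none_iff]
        simp only [PySem.Raise.InRange, List.length_set]
        omega
      have hnone2 : PySem.List.pyGetD visited c.1 [] = [] := by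
        apply PySem.List.pyGetD_of_none
        rw [PySem.List.pyGet?_eq_none_iff]
        simp only [PySem.Raise.InRange]
        omega
      unfold visGet
      rw [hnone1, hnone2, if_neg hcne]

lemma visGet_all_false (vis : List (List Bool)) (h : ∀ row ∈ vis, ∀ b ∈ row, b = false)
    (c : Int × Int) : visGet vis c = false := by
  unfold visGet
  by_cases hr : PySem.Raise.InRange vis.length c.1
  · have hrow := PySem.List.pyGetD_mem vis ([] : List Bool) hr
    by_cases hr2 : PySem.Raise.InRange (PySem.List.pyGetD vis c.1 []).length c.2
    · exact h _ hrow _ (PySem.List.pyGetD_mem _ false hr2)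
    · exact PySem.List.pyGetD_of_none _ _ _ ((PySem.List.pyGet?_eq_none_iff _ _).2 hr2)
  · rw [PySem.List.pyGetD_of_none _ _ _ ((PySem.List.pyGet?_eq_none_iff _ _).2 hr)]
    exact PySem.List.pyGetD_of_none _ _ _ ((PySem.List.pyGet?_eq_none_iff _ _).2 (by
      simp [PySem.Raise.InRange]))

lemma loopA_spec (lines : List String) (visited0 : List (List Bool)) :
    ∀ (fuel : Nat) (basin : PySem.Set (Int × Int)) (stack : List (Int × Int)) (visited : List (List Bool)),
    basin.Nodup →
    (∀ x ∈ stack, x ∈ basin) →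
    stack.Nodup →
    (∀ x ∈ basin, x ∈ allCells lines) →
    (∀ x ∈ basin, x ∉ stack → ∀ n ∈ nbrsA x.1 x.2, Valid lines n → n ∈ basin) →
    Shape lines visited →
    (∀ c : Int × Int, 0 ≤ c.1 → 0 ≤ c.2 → (visGet visited c = true ↔ (visGet visited0 c = true ∨ (c ∈ basin ∧ c ∉ stack)))) →
    ((fuel : Int) + basin.length ≥ stack.length + (allCells lines).length + 2) →
    (∀ x ∈ basin, x ∈ (loopA lines fuel basin stack visited).1) ∧
    (loopA lines fuel basin stack visited).1.Nodup ∧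
    (∀ P, ClosedU lines P → (∀ x ∈ basin, P x) → ∀ x ∈ (loopA lines fuel basin stack visited).1, P x) ∧
    (∀ x ∈ (loopA lines fuel basin stack visited).1, ∀ n ∈ nbrsA x.1 x.2, Valid lines n →
        n ∈ (loopA lines fuel basin stack visited).1) ∧
    Shape lines (loopA lines fuel basin stack visited).2 ∧
    (∀ c : Int × Int, 0 ≤ c.1 → 0 ≤ c.2 → (visGet (loopA lines fuel basin stack visited).2 c = true ↔
        (visGet visited0 c = true ∨ c ∈ (loopA lines fuel basin stack visited).1))) := by
  intro fuel
  induction fuel with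
  | zero =>
    intro basin stack visited hnd hsub hsnd hall hclosed hsh hvis hfuel
    exfalso
    have hle : basin.length ≤ (allCells lines).length :=
      (List.Nodup.subperm hnd (fun x hx => hall x hx)).length_le
    omega
  | succ fuel ih =>
    intro basin stack visited hnd hsub hsnd hall hclosed hsh hvis hfuel
    rcases List.eq_nil_or_concat stack with rfl | ⟨ys, c, hstk⟩
    · have hred : loopA lines (fuel + 1) basin [] visited = (basin, visited) := by
        rw [loopA]
        rfl
      rw [hred]
      refine ⟨fun x hx => hx, hnd, fun P hP hb x hx => hb x hx, ?_, hsh, ?_⟩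
      · intro x hx n hn hv
        exact hclosed x hx (by simp) n hn hv
      · intro c' h1 h2
        rw [hvis c' h1 h2]
        simp
    · rw [List.concat_eq_append] at hstk
      subst hstk
      have hcb : c ∈ basin := hsub c (by simp)
      have hcInB : InB lines c := (mem_allCells lines c).mp (hall c hcb)
      obtain ⟨hsh', hmark⟩ := mark_spec lines visited hsh c hcInB
      obtain ⟨D, h1, h2, h3, h4, h5⟩ := pushFold_spec lines (nbrsA c.1 c.2) basin ys hnd
      have hred : loopA lines (fuel + 1) basin (ys ++ [c]) visited
          = loopA lines fuel ((nbrsA c.1 c.2).foldl (pushStepA lines) (basin, ys)).1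
              ((nbrsA c.1 c.2).foldl (pushStepA lines) (basin, ys)).2
              (PySem.List.pySetD visited c.1
                (PySem.List.pySetD (PySem.List.pyGetD visited c.1 []) c.2 true)) := by
        rw [loopA, PySem.List.pop?_last]
      rw [hred, h1, h2]
      have hcys : c ∉ ys := by
        have hdis := List.disjoint_of_nodup_append hsnd
        intro h
        exact hdis h (by simp)
      have hysnd : ys.Nodup := List.Nodup.of_append_left hsnd
      have hDnd : D.Nodup := List.Nodup.of_append_right h4
      have hDdisj : ∀ x ∈ D, x ∉ basin := fun x hx => (h3 x hx).2.2
      have hcD : c ∉ D := fun h => hDdisj c h hcb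
      -- apply the induction hypothesis to the new state
      have hmain := ih (basin ++ D) (ys ++ D)
        (PySem.List.pySetD visited c.1
          (PySem.List.pySetD (PySem.List.pyGetD visited c.1 []) c.2 true))
        h4
        (by
          intro x hx
          rcases List.mem_append.mp hx with h | h
          · exact List.mem_append_left _ (hsub x (List.mem_append_left _ h))
          · exact List.mem_append_right _ h)
        (List.Nodup.append hysnd hDnd (fun x hxy hxD =>
          hDdisj x hxD (hsub x (List.mem_append_left _ hxy))))
        (by
          intro x hx
          rcases List.mem_append.mp hx with h | h
          · exact hall x h
          · exact (mem_allCells lines x).mpr (valid_InB lines x (h3 x h).2.1))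
        (by
          intro x hx hxn
          rcases List.mem_append.mp hx with hxb | hxD
          · have hxys : x ∉ ys := fun h => hxn (List.mem_append_left _ h)
            have hxD' : x ∉ D := fun h => hxn (List.mem_append_right _ h)
            by_cases hxc : x = c
            · subst hxc
              intro n hn hv
              exact h5 n hn hv
            · intro n hn hv
              have hmem := hclosed x hxb (by
                intro hmem
                rcases List.mem_append.mp hmem with h | h
                · exact hxys h
                · exact hxc (List.mem_singleton.mp h)) n hn hv
              exact List.mem_append_left _ hmem
          · exact absurd (List.mem_append_right _ hxD) (fun h => hxn h))
        hsh'
        (by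
          intro c' h1' h2'
          rw [hmark c' h1' h2']
          by_cases hc' : c' = c
          · subst hc'
            rw [if_pos rfl]
            constructor
            · intro _
              exact Or.inr ⟨List.mem_append_left _ hcb, by
                intro hmem
                rcases List.mem_append.mp hmem with h | h
                · exact hcys h
                · exact hcD h⟩
            · intro _
              rfl
          · rw [if_neg hc', hvis c' h1' h2']
            constructor
            · rintro (h | ⟨hb', hs'⟩)
              · exact Or.inl h
              · refine Or.inr ⟨List.mem_append_left _ hb', ?_⟩
                intro hmem
                rcases List.mem_append.mp hmem with h | h
                · exact hs' (List.mem_append_left _ h)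
                · exact hDdisj c' h hb'
            · rintro (h | ⟨hb', hs'⟩)
              · exact Or.inl h
              · have hb'' : c' ∈ basin := by
                  rcases List.mem_append.mp hb' with h | h
                  · exact h
                  · exact absurd (List.mem_append_right ys h) hs'
                refine Or.inr ⟨hb'', ?_⟩
                intro hmem
                rcases List.mem_append.mp hmem with h | h
                · exact hs' (List.mem_append_left _ h)
                · exact hc' (List.mem_singleton.mp h))
        (by
          simp only [List.length_append, List.length_singleton] at hfuel ⊢
          push_cast at hfuel ⊢
          omega)
      obtain ⟨m1, m2, m3, m4, m5, m6⟩ := hmain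
      refine ⟨?_, m2, ?_, m4, m5, m6⟩
      · intro x hx
        exact m1 x (List.mem_append_left _ hx)
      · intro P hP hbase
        apply m3 P hP
        intro x hx
        rcases List.mem_append.mp hx with h | h
        · exact hbase x h
        · exact hP c (hbase c hcb) x (h3 x h).1 (h3 x h).2.1

lemma nbrsB_eq : nbrsB = nbrsA := rfl

lemma layerFold_spec (lines : List String) (F : List (Int × Int)) :
    ∀ (S : PySem.Set (Int × Int)) (W : List (Int × Int)), S.Nodup →
    ∃ D, (F.foldl (fun st xy => (nbrsA xy.1 xy.2).foldl (pushStepA lines) st) (S, W)).1 = S ++ D ∧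
      (F.foldl (fun st xy => (nbrsA xy.1 xy.2).foldl (pushStepA lines) st) (S, W)).2 = W ++ D ∧
      (∀ x ∈ D, Valid lines x ∧ x ∉ S ∧ ∃ xy ∈ F, x ∈ nbrsA xy.1 xy.2) ∧ (S ++ D).Nodup ∧
      (∀ xy ∈ F, ∀ n ∈ nbrsA xy.1 xy.2, Valid lines n → n ∈ S ++ D) := by
  induction F with
  | nil =>
    intro S W hS
    exact ⟨[], by simp, by simp, by simp, by simpa using hS, by simp⟩
  | cons xy F ih =>
    intro S W hS
    obtain ⟨D1, g1, g2, g3, g4, g5⟩ := pushFold_spec lines (nbrsA xy.1 xy.2) S W hS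
    obtain ⟨D2, k1, k2, k3, k4, k5⟩ := ih (S ++ D1) (W ++ D1) g4
    have hfold : (List.foldl (fun st xy => (nbrsA xy.1 xy.2).foldl (pushStepA lines) st) (S, W) (xy :: F))
        = List.foldl (fun st xy => (nbrsA xy.1 xy.2).foldl (pushStepA lines) st) (S ++ D1, W ++ D1) F := by
      rw [List.foldl_cons]
      have hp : (nbrsA xy.1 xy.2).foldl (pushStepA lines) (S, W)
          = (((nbrsA xy.1 xy.2).foldl (pushStepA lines) (S, W)).1,
             ((nbrsA xy.1 xy.2).foldl (pushStepA lines) (S, W)).2) := rfl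
      rw [hp, g1, g2]
    refine ⟨D1 ++ D2, ?_, ?_, ?_, ?_, ?_⟩
    · rw [hfold, k1, List.append_assoc]
    · rw [hfold, k2, List.append_assoc]
    · intro z hz
      rcases List.mem_append.mp hz with h | h
      · exact ⟨(g3 z h).2.1, (g3 z h).2.2, xy, List.mem_cons_self, (g3 z h).1⟩
      · obtain ⟨hv, hns, xy', hxy', hzn⟩ := k3 z h
        exact ⟨hv, fun hmem => hns (List.mem_append_left _ hmem), xy', List.mem_cons_of_mem _ hxy', hzn⟩
    · rw [← List.append_assoc]; exact k4
    · intro z hz n hn hv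
      rw [← List.append_assoc]
      rcases List.mem_cons.mp hz with rfl | hz
      · exact List.mem_append_left _ (g5 n hn hv)
      · exact k5 z hz n hn hv

lemma loopB_spec (lines : List String) :
    ∀ (fuel : Nat) (comp : PySem.Set (Int × Int)) (frontier : List (Int × Int)),
    comp.Nodup →
    (∀ x ∈ frontier, x ∈ comp) →
    (∀ x ∈ comp, x ∈ allCells lines) →
    (∀ x ∈ comp, x ∉ frontier → ∀ n ∈ nbrsA x.1 x.2, Valid lines n → n ∈ comp) →
    ((fuel : Int) + comp.length ≥ (if frontier = [] then 0 else 1) + (allCells lines).length + 2) →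
    (∀ x ∈ comp, x ∈ loopB lines (lines.map PySem.Str.strip) fuel comp frontier) ∧
    (loopB lines (lines.map PySem.Str.strip) fuel comp frontier).Nodup ∧
    (∀ P, ClosedU lines P → (∀ x ∈ comp, P x) →
        ∀ x ∈ loopB lines (lines.map PySem.Str.strip) fuel comp frontier, P x) ∧
    (∀ x ∈ loopB lines (lines.map PySem.Str.strip) fuel comp frontier,
        ∀ n ∈ nbrsA x.1 x.2, Valid lines n → n ∈ loopB lines (lines.map PySem.Str.strip) fuel comp frontier) := by
  intro fuel
  induction fuel with
  | zero =>
    intro comp frontier hnd hsub hall hclosed hfuel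
    exfalso
    have hle : comp.length ≤ (allCells lines).length :=
      (List.Nodup.subperm hnd (fun x hx => hall x hx)).length_le
    rcases frontier with _ | ⟨x, xs⟩ <;> simp at hfuel <;> omega
  | succ fuel ih =>
    intro comp frontier hnd hsub hall hclosed hfuel
    rcases frontier with _ | ⟨x, xs⟩
    · have hred : loopB lines (lines.map PySem.Str.strip) (fuel + 1) comp [] = comp := by
        rw [loopB]
      rw [hred]
      refine ⟨fun y hy => hy, hnd, fun P hP hb y hy => hb y hy, ?_⟩
      intro y hy n hn hv
      exact hclosed y hy (by simp) n hn hv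
    · have hred : loopB lines (lines.map PySem.Str.strip) (fuel + 1) comp (x :: xs)
          = loopB lines (lines.map PySem.Str.strip) fuel
              ((x :: xs).foldl (fun st xy => (nbrsA xy.1 xy.2).foldl (pushStepA lines) st) (comp, [])).1
              ((x :: xs).foldl (fun st xy => (nbrsA xy.1 xy.2).foldl (pushStepA lines) st) (comp, [])).2 := by
        rw [loopB, pushStepB_eq, nbrsB_eq]
      obtain ⟨D, g1, g2, g3, g4, g5⟩ := layerFold_spec lines (x :: xs) comp [] hnd
      rw [hred, g1, g2]
      simp only [List.nil_append]
      have hmain := ih (comp ++ D) D g4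
        (fun y hy => List.mem_append_right _ hy)
        (by
          intro y hy
          rcases List.mem_append.mp hy with h | h
          · exact hall y h
          · exact (mem_allCells lines y).mpr (valid_InB lines y (g3 y h).1))
        (by
          intro y hy hyD
          rcases List.mem_append.mp hy with hyc | hyD'
          · by_cases hyf : y ∈ x :: xs
            · intro n hn hv
              exact g5 y hyf n hn hv
            · intro n hn hv
              exact List.mem_append_left _ (hclosed y hyc hyf n hn hv)
          · exact absurd hyD' hyD)
        (by
          rcases hD : D with _ | ⟨d, ds⟩
          · subst hD
            simp only [List.append_nil]

            simp only [if_neg (by simp : ¬ ((x :: xs) = []))] at hfuel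
            push_cast at hfuel ⊢
            omega
          · have hDlen : 1 ≤ D.length := by rw [hD]; simp
            rw [← hD]
            rw [if_neg (by rw [hD]; simp : ¬ (D = []))]
            simp only [if_neg (by simp : ¬ ((x :: xs) = []))] at hfuel
            simp only [List.length_append]
            push_cast at hfuel ⊢
            omega)
      obtain ⟨m1, m2, m3, m4⟩ := hmain
      refine ⟨?_, m2, ?_, m4⟩
      · intro y hy
        exact m1 y (List.mem_append_left _ hy)
      · intro P hP hbase
        apply m3 P hP
        intro y hy
        rcases List.mem_append.mp hy with h | h
        · exact hbase y h
        · obtain ⟨hv, hns, xy, hxy, hyn⟩ := g3 y h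
          exact hP xy (hbase xy (hsub xy hxy)) y hyn hv

-- both flood fills from seed s discover the same set: the least Valid-closed superset of {s}
lemma run_spec (lines : List String) (s : Int × Int) (hs : InB lines s)
    (visited : List (List Bool)) (hsh : Shape lines visited) :
    (∀ c, c ∈ (loopA lines ((lines.map (fun line => (PySem.Str.strip line).toList.length)).sum + 2) [s] [s] visited).1
        ↔ c ∈ loopB lines (lines.map PySem.Str.strip) ((lines.map (fun line => (PySem.Str.strip line).toList.length)).sum + 2) [s] [s]) ∧
    (loopA lines ((lines.map (fun line => (PySem.Str.strip line).toList.length)).sum + 2) [s] [s] visited).1.length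
      = (loopB lines (lines.map PySem.Str.strip) ((lines.map (fun line => (PySem.Str.strip line).toList.length)).sum + 2) [s] [s]).length ∧
    (∀ x ∈ (loopA lines ((lines.map (fun line => (PySem.Str.strip line).toList.length)).sum + 2) [s] [s] visited).1, x ∈ allCells lines) ∧
    Shape lines (loopA lines ((lines.map (fun line => (PySem.Str.strip line).toList.length)).sum + 2) [s] [s] visited).2 ∧
    (∀ c : Int × Int, 0 ≤ c.1 → 0 ≤ c.2 →
      (visGet (loopA lines ((lines.map (fun line => (PySem.Str.strip line).toList.length)).sum + 2) [s] [s] visited).2 c = true ↔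
        (visGet visited c = true ∨ c ∈ (loopA lines ((lines.map (fun line => (PySem.Str.strip line).toList.length)).sum + 2) [s] [s] visited).1))) := by
  have hN := length_allCells lines
  have hsnd : ([s] : List (Int × Int)).Nodup := List.nodup_singleton s
  have hsub : ∀ x ∈ ([s] : List (Int × Int)), x ∈ ([s] : List (Int × Int)) := fun x hx => hx
  have hallm : ∀ x ∈ ([s] : List (Int × Int)), x ∈ allCells lines := by
    intro x hx
    rcases List.mem_singleton.mp hx with rfl
    exact (mem_allCells lines x).mpr hs
  have hA := loopA_spec lines visited
    ((lines.map (fun line => (PySem.Str.strip line).toList.length)).sum + 2) [s] [s] visited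
    hsnd hsub hsnd hallm
    (fun x hx hxn => absurd hx hxn)
    hsh
    (by
      intro c h1 h2
      constructor
      · exact fun h => Or.inl h
      · rintro (h | ⟨h1', h2'⟩)
        · exact h
        · exact absurd h1' h2')
    (by simp only [hN, List.length_singleton]; omega)
  have hB := loopB_spec lines
    ((lines.map (fun line => (PySem.Str.strip line).toList.length)).sum + 2) [s] [s]
    hsnd hsub hallm
    (fun x hx hxn => absurd hx hxn)
    (by
      rw [if_neg (by simp : ¬ (([s] : List (Int × Int)) = []))]
      simp only [hN, List.length_singleton]
      omega)
  obtain ⟨a1, a2, a3, a4, a5, a6⟩ := hA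
  obtain ⟨b1, b2, b3, b4⟩ := hB
  have hmem : ∀ c, c ∈ (loopA lines ((lines.map (fun line => (PySem.Str.strip line).toList.length)).sum + 2) [s] [s] visited).1
      ↔ c ∈ loopB lines (lines.map PySem.Str.strip) ((lines.map (fun line => (PySem.Str.strip line).toList.length)).sum + 2) [s] [s] := by
    intro c
    constructor
    · intro h
      exact a3 _ (fun x hx n hn hv => b4 x hx n hn hv) (fun x hx => b1 x hx) c h
    · intro h
      exact b3 _ (fun x hx n hn hv => a4 x hx n hn hv) (fun x hx => a1 x hx) c h
  have hall' := a3 _ (fun x hx n hn hv => (mem_allCells lines n).mpr (valid_InB lines n hv)) hallm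
  exact ⟨hmem, ((List.perm_ext_iff_of_nodup a2 b2).mpr hmem).length_eq, hall', a5, a6⟩

lemma visited0_spec (lines : List String) :
    Shape lines (lines.map (fun line => (PySem.Str.strip line).toList.map (fun _ => false))) ∧
    ∀ c : Int × Int, visGet (lines.map (fun line => (PySem.Str.strip line).toList.map (fun _ => false))) c = false := by
  constructor
  · constructor
    · simp
    · intro i hi
      simp only [List.getElem_map, List.length_map, stripLenN]
      rw [List.getD_eq_getElem lines "" (by simpa using hi)]
  · intro c
    apply visGet_all_false
    intro row hrow b hb
    simp only [List.mem_map] at hrow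
    obtain ⟨line, -, rfl⟩ := hrow
    simp only [List.mem_map] at hb
    obtain ⟨-, -, rfl⟩ := hb
    rfl

-- the state relation between A's (basins, visited) and B's (seen, sizes)
def RelAB (lines : List String) (sA : List Int × List (List Bool)) (sB : PySem.Set (Int × Int) × List Int) : Prop :=
  sA.1 = sB.2 ∧ Shape lines sA.2 ∧ sB.1.Nodup ∧
  (∀ x ∈ sB.1, x ∈ allCells lines) ∧
  ∀ c : Int × Int, 0 ≤ c.1 → 0 ≤ c.2 → (visGet sA.2 c = true ↔ c ∈ sB.1)



-- the two scans, as standalone states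
def outerA (lines : List String) : List Int × List (List Bool) :=
  (PySem.List.enumerate lines 0).foldl
    (fun (st : List Int × List (List Bool)) p =>
      (PySem.List.enumerate (PySem.Str.strip p.2).toList 0).foldl
        (fun (st : List Int × List (List Bool)) q =>
          if PySem.List.pyGetD (PySem.List.pyGetD st.2 p.1 []) q.1 false
              || !(decide ('0' ≤ q.2) && decide (q.2 < '9')) then st
          else
            let r := loopA lines ((lines.map (fun line => (PySem.Str.strip line).toList.length)).sum + 2)
              (PySem.Set.ofList [(p.1, q.1)]) [(p.1, q.1)] st.2
            (st.1 ++ [(r.1.length : Int)], r.2)) st)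
    ([], lines.map (fun line => (PySem.Str.strip line).toList.map (fun _ => false)))

def outerB (lines : List String) : PySem.Set (Int × Int) × List Int :=
  (PySem.List.pyRange 0 (lines.length : Int) 1).foldl
    (fun (st : PySem.Set (Int × Int) × List Int) i =>
      (PySem.List.pyRange 0 ((PySem.List.pyGetD (lines.map PySem.Str.strip) i "").toList.length : Int) 1).foldl
        (fun (st : PySem.Set (Int × Int) × List Int) j =>
          if PySem.Set.contains st.1 (i, j)
              || !(decide ('0' ≤ PySem.List.pyGetD (PySem.List.pyGetD (lines.map PySem.Str.strip) i "").toList j ' ')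
                    && decide (PySem.List.pyGetD (PySem.List.pyGetD (lines.map PySem.Str.strip) i "").toList j ' ' < '9')) then st
          else
            let comp := loopB lines (lines.map PySem.Str.strip)
              (((lines.map PySem.Str.strip).map (fun s => s.toList.length)).sum + 2)
              (PySem.Set.ofList [(i, j)]) [(i, j)]
            (PySem.Set.union st.1 comp, st.2 ++ [(comp.length : Int)])) st)
    (PySem.Set.empty, [])

lemma stripped_getD (lines : List String) (i : Int) :
    PySem.List.pyGetD (lines.map PySem.Str.strip) i "" = PySem.Str.strip (PySem.List.pyGetD lines i "") := by
  have h := PySem.List.pyGetD_map PySem.Str.strip lines i ""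
  simpa [show PySem.Str.strip "" = "" from by decide] using h

lemma outer_eq (lines : List String) : (outerA lines).1 = (outerB lines).2 := by
  suffices h : RelAB lines (outerA lines) (outerB lines) from h.1
  unfold outerA outerB
  rw [PySem.List.enumerate_eq_map_pyRange lines "", List.foldl_map]
  simp only [stripped_getD, List.map_map, Function.comp_def, PySem.List.len_eq,
    show ∀ (cs : List Char), PySem.List.enumerate cs 0
        = List.map (fun j => (j, PySem.List.pyGetD cs j ' ')) (PySem.List.pyRange 0 (PySem.List.len cs) 1)
      from fun cs => PySem.List.enumerate_eq_map_pyRange cs ' ',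
    List.foldl_map]
  apply List.foldl_rel
  · -- initial states are related
    refine ⟨rfl, (visited0_spec lines).1, by simp [PySem.Set.empty], by simp [PySem.Set.empty], ?_⟩
    intro c h1 h2
    rw [(visited0_spec lines).2 c]
    simp [PySem.Set.empty]
  · intro i hi sA sB hR
    obtain ⟨hi1, hi2⟩ := PySem.List.mem_pyRange_one.mp hi
    apply List.foldl_rel hR
    intro j hj sA' sB' hR'
    obtain ⟨hj1, hj2⟩ := PySem.List.mem_pyRange_one.mp hj
    obtain ⟨r1, r2, r3, r4, r5⟩ := hR'
    have hKeq : (PySem.Str.strip (PySem.List.pyGetD lines i "")).toList.length = stripLenN lines i.toNat := by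
      unfold stripLenN
      rw [PySem.List.pyGetD_eq_getElem lines "" hi1 (by simpa using hi2),
          List.getD_eq_getElem lines "" (by omega)]
    have hsInB : InB lines (i, j) := ⟨hi1, by simpa using hi2, hj1, by
      show j < (stripLenN lines i.toNat : Int)
      rw [← hKeq]
      exact hj2⟩
    have hcond : PySem.List.pyGetD (PySem.List.pyGetD sA'.2 i []) j false
        = PySem.Set.contains sB'.1 (i, j) := by
      by_cases hm : ((i : Int), (j : Int)) ∈ sB'.1
      · rw [(PySem.Set.contains_iff _ _).2 hm]
        exact (r5 (i, j) hi1 hj1).mpr hm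
      · have hc : PySem.Set.contains sB'.1 (i, j) = false :=
          Bool.eq_false_iff.mpr (fun h => hm ((PySem.Set.contains_iff _ _).1 h))
        rw [hc]
        exact Bool.eq_false_iff.mpr (fun h => hm ((r5 (i, j) hi1 hj1).1 h))
    rw [hcond]
    split_ifs with hif
    · exact ⟨r1, r2, r3, r4, r5⟩
    · rw [show PySem.Set.ofList [((i : Int), (j : Int))] = [((i : Int), (j : Int))] from rfl]
      obtain ⟨hmem, hlen, hall, hshape, hvis⟩ := run_spec lines (i, j) hsInB sA'.2 r2
      refine ⟨?_, hshape, PySem.Set.nodup_union _ _ r3, ?_, ?_⟩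
      · rw [r1, hlen]
      · intro x hx
        rcases (PySem.Set.mem_union _ _ _).mp hx with h | h
        · exact r4 x h
        · exact hall x ((hmem x).mpr h)
      · intro c h1 h2
        exact (hvis c h1 h2).trans ((or_congr (r5 c h1 h2) (hmem c)).trans
          (PySem.Set.mem_union _ _ _).symm)

-- ===== VERDICT (by name: the statement is the Claim_ definition above) =====
theorem part2_spec : Claim_equal_part2 := by
  intro lines _
  show part2 lines = part2_alt lines
  have hA : part2 lines = (PySem.List.slice (PySem.List.sorted (outerA lines).1 (fun x => x) false)
      (some (-3)) none).foldl (· * ·) 1 := rfl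
  have hB : part2_alt lines = (PySem.List.slice (PySem.List.sorted (outerB lines).2 (fun x => x) false)
      (some (-3)) none).foldl (· * ·) 1 := rfl
  rw [hA, hB, outer_eq]
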